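-- pv_equiv track=rewrite | github.com/Rebaccamin/triple_retriever | Triple_extractor/triple_cluster.py | sp_canopiese
-- ===== SOURCE A (Python) =====
-- def sp_canopiese(triples):
--     '''
--     split the triples into smaller canopies by same subject-predicate.
--     :param triples:
--     :return:
--     '''
--     canopies=dict()
--     for t in triples:
--         subject=t[0]
--         predicate=t[1]
--         sp=subject+'$$'+predicate
--         if sp not in canopies:
--             canopies[sp]=[t]
--         else:
--             canopies[sp]=canopies[sp]+[t]
--     return canopies
-- ===== SOURCE B (Python) =====
-- def sp_canopiese(triples):
--     '''
--     split the triples into smaller canopies by same subject-predicate.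
--     Keys-first decomposition: compute all keys, dedupe them in first-appearance
--     order, then gather each canopy with one filter pass per distinct key.
--     '''
--     keys = [t[0] + '$$' + t[1] for t in triples]
--     canopies = dict()
--     for k in dict.fromkeys(keys):
--         canopies[k] = [t for t, kk in zip(triples, keys) if kk == k]
--     return canopies
-- ===== Notes on version B (the rewrite author's own statement) =====
-- stated objective: alternative
-- what changed: A grows each canopy inside one live hash-grouping pass (append-on-hit/insert-on-miss per triple); B first maps every triple to its key, deduplicates the key list in first-appearance order, and then builds each canopy by filtering the zipped (triple,key) list once per distinct key.
import Mathlib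
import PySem

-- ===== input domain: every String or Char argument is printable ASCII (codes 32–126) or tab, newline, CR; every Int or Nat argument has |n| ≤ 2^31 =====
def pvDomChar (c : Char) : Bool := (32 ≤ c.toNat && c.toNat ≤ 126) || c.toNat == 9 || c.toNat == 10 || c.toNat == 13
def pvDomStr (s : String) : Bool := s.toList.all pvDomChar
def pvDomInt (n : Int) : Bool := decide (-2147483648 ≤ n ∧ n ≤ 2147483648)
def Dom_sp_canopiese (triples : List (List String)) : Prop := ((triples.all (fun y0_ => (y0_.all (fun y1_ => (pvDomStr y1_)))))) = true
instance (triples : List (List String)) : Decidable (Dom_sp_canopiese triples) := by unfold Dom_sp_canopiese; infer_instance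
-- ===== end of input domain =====

-- B replaces A's live hash-grouping pass by a keys-first decomposition (dedupe the key
-- list, then one filter pass per distinct key): an alternative of similar cost.


-- ===== PORT A =====
-- one pass; per triple: look the key up, append on hit, insert [t] on miss
def sp_canopiese (triples : List (List String)) : List (String × List (List String)) :=
  (triples.foldl
    (fun canopies t =>
      let subject := (PySem.List.pyGet? t 0).getD ""     -- t[0]; Pre_ keeps it in range
      let predicate := (PySem.List.pyGet? t 1).getD ""   -- t[1]; Pre_ keeps it in range
      let sp := subject ++ "$$" ++ predicate
      match canopies.get? sp with                        -- 'if sp not in canopies'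
      | none   => canopies.insert sp [t]
      | some v => canopies.insert sp (v ++ [t]))
    PySem.Dict.empty).items

-- ===== PORT B =====
def pvKey (t : List String) : String :=
  (PySem.List.pyGet? t 0).getD "" ++ "$$" ++ (PySem.List.pyGet? t 1).getD ""

def sp_canopiese_alt (triples : List (List String)) : List (String × List (List String)) :=
  let keys := triples.map pvKey
  ((PySem.List.dedup keys).foldl                         -- dict.fromkeys(keys)
    (fun canopies k =>
      canopies.insert k (((triples.zip keys).filter (fun p => p.2 == k)).map Prod.fst))
    PySem.Dict.empty).items

-- ===== PRECONDITION & SPEC =====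
-- Pre_ excludes exactly the inputs where Python A raises IndexError: a triple with
-- fewer than two components (t[0]/t[1] out of range).
def Pre_sp_canopiese (triples : List (List String)) : Prop :=
  ∀ t ∈ triples, 2 ≤ t.length

instance (triples : List (List String)) : Decidable (Pre_sp_canopiese triples) := by
  unfold Pre_sp_canopiese; infer_instance

def pvWitness_sp_canopiese : List (List String) :=
  [["a", "p", "x"], ["a", "p", "y"], ["b", "q", "x"]]

def Spec_sp_canopiese (triples : List (List String)) (out : List (String × List (List String))) : Prop := out = sp_canopiese_alt triples
instance (triples : List (List String)) (out : List (String × List (List String))) : Decidable (Spec_sp_canopiese triples out) := by unfold Spec_sp_canopiese; infer_instance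

-- ===== CLAIM (what is proved, stated in full; the proofs are below) =====
def Claim_equal_sp_canopiese : Prop := ∀ (triples : List (List String)), Dom_sp_canopiese triples → Pre_sp_canopiese triples → Spec_sp_canopiese triples (sp_canopiese triples)

-- ===== LEMMAS AND PROOFS =====

-- A's per-triple step is exactly 'modify (pvKey t) [] (· ++ [t])'
theorem stepA_eq_modify (d : PySem.Dict String (List (List String))) (t : List String) :
    (match d.get? (pvKey t) with
      | none   => d.insert (pvKey t) [t]
      | some v => d.insert (pvKey t) (v ++ [t]))
    = d.modify (pvKey t) [] (· ++ [t]) := by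
  simp only [PySem.Dict.modify, PySem.Dict.getD_eq_get?_getD]
  cases d.get? (pvKey t) <;> rfl

theorem dictA_eq_modify_fold (triples : List (List String)) :
    (triples.foldl
      (fun canopies t =>
        let subject := (PySem.List.pyGet? t 0).getD ""
        let predicate := (PySem.List.pyGet? t 1).getD ""
        let sp := subject ++ "$$" ++ predicate
        match canopies.get? sp with
        | none   => canopies.insert sp [t]
        | some v => canopies.insert sp (v ++ [t]))
      PySem.Dict.empty)
    = (triples.map (fun t => (pvKey t, t))).foldl
        (fun d p => d.modify p.1 [] (· ++ [p.2])) PySem.Dict.empty := by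
  rw [List.foldl_map]
  exact PySem.List.foldl_congr_mem _ _ _ _ (fun acc t _ => stepA_eq_modify acc t)

theorem zip_map_filter (triples : List (List String)) (k : String) :
    ((triples.zip (triples.map pvKey)).filter (fun p => p.2 == k)).map Prod.fst
    = ((triples.map (fun t => (pvKey t, t))).filter (fun p => p.1 == k)).map Prod.snd := by
  induction triples with
  | nil => rfl
  | cons t ts ih =>
      simp only [List.map_cons, List.zip_cons_cons, List.filter_cons]
      by_cases h : pvKey t == k
      · simp [h, ih]
      · simp [h, ih]

-- ===== VERDICT (by name: the statement is the Claim_ definition above) =====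
theorem sp_canopiese_spec : Claim_equal_sp_canopiese := by
  intro triples _ _
  unfold Spec_sp_canopiese sp_canopiese sp_canopiese_alt
  rw [dictA_eq_modify_fold]
  set l := triples.map (fun t => (pvKey t, t)) with hl
  have hnd : ((l.foldl (fun d p => d.modify p.1 [] (· ++ [p.2])) PySem.Dict.empty)).keys.Nodup := by
    exact PySem.Dict.nodup_keys_foldl_modify_key l Prod.fst [] (fun d p => (· ++ [p.2])) _
      PySem.Dict.nodup_keys_empty
  have hkeys : ((l.foldl (fun d p => d.modify p.1 [] (· ++ [p.2])) PySem.Dict.empty)).keys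
      = PySem.Set.ofList (triples.map pvKey) := by
    rw [PySem.Dict.keys_foldl_modify_key l Prod.fst [] (fun d p => (· ++ [p.2])) PySem.Dict.empty]
    simp [hl, List.map_map, PySem.Set.update_nil_left, Function.comp_def]
  rw [PySem.Dict.items_eq_map_keys _ hnd ([] : List (List String)), hkeys]
  -- B's side: fresh distinct keys appended from empty
  show _ = ((PySem.List.dedup (triples.map pvKey)).foldl
      (fun canopies k =>
        canopies.insert k (((triples.zip (triples.map pvKey)).filter (fun p => p.2 == k)).map Prod.fst))
      PySem.Dict.empty).items
  have hB := PySem.Dict.items_foldl_insert_fresh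
      (PySem.List.dedup (triples.map pvKey)) id
      (fun k => ((triples.zip (triples.map pvKey)).filter (fun p => p.2 == k)).map Prod.fst)
      PySem.Dict.empty (fun a _ => rfl)
      (by simp)
  simp only [id_eq, show (PySem.Dict.empty : PySem.Dict String (List (List String))).items = [] from rfl, List.nil_append] at hB
  rw [hB]
  simp only [PySem.List.dedup_eq_ofList]
  apply List.map_congr_left
  intro k _
  refine Prod.ext rfl ?_
  simp only
  rw [PySem.Dict.getD_foldl_modify_append, PySem.Dict.getD_empty, List.nil_append,
      zip_map_filter]
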